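-- pv_equiv track=rewrite | github.com/pianistprogrammer/ABC2VEC | abc2vec_package/abc2vec/tokenizer/patchifier.py | split_into_bars
-- ===== SOURCE A (Python) =====
-- from typing import Dict, List
--
-- def split_into_bars(abc_body: str) -> List[str]:
--     """
--     Split ABC body into individual bars.
--
--     Handles various bar separators in ABC notation:
--     - |  (single bar line)
--     - |: (repeat start)
--     - :| (repeat end)
--     - || (double bar line)
--     - [| and |] (thick bar lines)
--
--     Args:
--         abc_body: ABC notation body (without headers)
--
--     Returns:
--         List of bar strings
--     """
--     body = abc_body.strip()
--     bars = []
--     current_bar = []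
--     i = 0
--
--     while i < len(body):
--         ch = body[i]
--
--         if ch == "|":
--             # Save current bar if non-empty
--             bar_str = "".join(current_bar).strip()
--             if bar_str:
--                 bars.append(bar_str)
--             current_bar = []
--
--             # Skip multi-character barlines (|:, |], etc.)
--             if i + 1 < len(body) and body[i + 1] in ":|]":
--                 i += 2
--                 continue
--
--         elif ch == ":" and i + 1 < len(body) and body[i + 1] == "|":
--             # Handle :| repeat ending
--             bar_str = "".join(current_bar).strip()
--             if bar_str:
--                 bars.append(bar_str)
--             current_bar = []
--             i += 2
--             continue
--
--         else:
--             current_bar.append(ch)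
--
--         i += 1
--
--     # Don't forget the last bar
--     bar_str = "".join(current_bar).strip()
--     if bar_str:
--         bars.append(bar_str)
--
--     return bars
-- ===== SOURCE B (Python) =====
-- from typing import List
--
--
-- def split_into_bars(abc_body: str) -> List[str]:
--     """Split ABC body into bars: repeatedly partition on '|', classifying the
--     barline by one char of lookbehind (':|') or lookahead ('|:', '||', '|]'),
--     then strip and drop empty pieces."""
--     segments = []
--     rest = abc_body.strip()
--     while True:
--         piece, sep, rest = rest.partition("|")
--         if not sep:
--             segments.append(piece)
--             break
--         if piece.endswith(":"):
--             segments.append(piece[:-1])          # ':|' repeat-end barline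
--         else:
--             segments.append(piece)
--             if rest[:1] in (":", "|", "]"):      # '|:', '||' or '|]' barline
--                 rest = rest[1:]
--     return [bar for bar in map(str.strip, segments) if bar]
-- ===== Notes on version B (the rewrite author's own statement) =====
-- stated objective: faster
-- what changed: Replaces A's char-by-char index state machine (current_bar accumulator, manual i += 2 skipping) with repeated str.partition on the bar character, classifying each barline by one char of lookbehind or lookahead, followed by a strip-and-filter comprehension over the pieces; partition scans in C so the Python-level loop runs once per bar instead of once per char.
import Mathlib
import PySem

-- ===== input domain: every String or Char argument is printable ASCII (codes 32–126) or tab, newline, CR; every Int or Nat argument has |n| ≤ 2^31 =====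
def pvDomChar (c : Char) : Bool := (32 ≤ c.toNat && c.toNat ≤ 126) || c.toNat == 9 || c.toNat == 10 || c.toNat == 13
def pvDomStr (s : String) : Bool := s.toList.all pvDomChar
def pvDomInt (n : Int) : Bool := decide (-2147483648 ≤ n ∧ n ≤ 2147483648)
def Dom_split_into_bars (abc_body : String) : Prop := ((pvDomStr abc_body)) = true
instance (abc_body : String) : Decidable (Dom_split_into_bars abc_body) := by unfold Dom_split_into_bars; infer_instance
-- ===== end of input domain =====

-- B replaces A's char-by-char index scanner (current_bar accumulator, manual i += 2
-- skipping) by repeated partition at the next '|', classifying the barline with one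
-- char of lookbehind/lookahead, followed by a strip-and-filter pass over the pieces.

-- ===== PORT A =====
-- A's while loop over index i, carrying current_bar and bars; advancing i by 1 or 2
-- becomes consuming one or two chars of the remaining list.
def splitA_loop : List Char → List Char → List String → List String
  | [], cur, bars =>
      let s := PySem.Str.strip (String.ofList cur)
      if s = "" then bars else bars ++ [s]
  | c :: rest, cur, bars =>
      if c = '|' then
        let s := PySem.Str.strip (String.ofList cur)
        let bars' := if s = "" then bars else bars ++ [s]
        match rest with
        | d :: rest' =>
            if d = ':' ∨ d = '|' ∨ d = ']' then splitA_loop rest' [] bars'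
            else splitA_loop (d :: rest') [] bars'
        | [] => splitA_loop [] [] bars'
      else if h : c = ':' ∧ rest.head? = some '|' then
        let s := PySem.Str.strip (String.ofList cur)
        let bars' := if s = "" then bars else bars ++ [s]
        splitA_loop rest.tail [] bars'
      else
        splitA_loop rest (cur ++ [c]) bars
  termination_by cs _ _ => cs.length
  decreasing_by
    all_goals simp

def split_into_bars (abc_body : String) : List String :=
  splitA_loop (PySem.Str.strip abc_body).toList [] []

-- ===== PORT B =====
-- piece, sep, rest = rest.partition("|")  ↦  takeWhile / dropWhile at the first '|';
-- 'piece.endswith(":")' ↦ getLast?, 'rest[:1] in (":","|","]")' ↦ head? tests.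
def segsB (cs : List Char) : List (List Char) :=
  let piece := cs.takeWhile (· ≠ '|')
  let drop := cs.dropWhile (· ≠ '|')
  if hd : drop.isEmpty then [piece]
  else if piece.getLast? = some ':' then
    piece.dropLast :: segsB drop.tail
  else if drop.tail.head? = some ':' ∨ drop.tail.head? = some '|' ∨ drop.tail.head? = some ']' then
    piece :: segsB drop.tail.tail
  else
    piece :: segsB drop.tail
  termination_by cs.length
  decreasing_by
    all_goals
      have hs := List.length_dropWhile_le (p := (· ≠ '|')) (l := cs)
      simp [List.isEmpty_iff] at hd
      rcases h' : cs.dropWhile (· ≠ '|') with _ | ⟨x, xs⟩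
      · exact absurd h' hd
      all_goals (rw [h'] at hs; simp [List.length_tail] at hs ⊢ <;> omega)

def split_into_bars_alt (abc_body : String) : List String :=
  ((segsB (PySem.Str.strip abc_body).toList).map
      (fun p => PySem.Str.strip (String.ofList p))).filter (· ≠ "")

-- ===== PRECONDITION & SPEC =====
def Spec_split_into_bars (abc_body : String) (out : List String) : Prop := out = split_into_bars_alt abc_body
instance (abc_body : String) (out : List String) : Decidable (Spec_split_into_bars abc_body out) := by unfold Spec_split_into_bars; infer_instance

-- ===== CLAIM (what is proved, stated in full; the proofs are below) =====
def Claim_equal_split_into_bars : Prop := ∀ (abc_body : String), Dom_split_into_bars abc_body → Spec_split_into_bars abc_body (split_into_bars abc_body)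

-- ===== LEMMAS AND PROOFS =====

-- strip each piece and keep the non-empty ones (the list comprehension of Source B)
def pvPost (ss : List (List Char)) : List String :=
  (ss.map (fun p => PySem.Str.strip (String.ofList p))).filter (· ≠ "")

-- prepend pending content to the first piece
def pvConsFirst (cur : List Char) : List (List Char) → List (List Char)
  | [] => [cur]
  | s :: t => (cur ++ s) :: t

theorem pvPost_cons (p : List Char) (ss : List (List Char)) :
    pvPost (p :: ss) =
      (if PySem.Str.strip (String.ofList p) = "" then []
       else [PySem.Str.strip (String.ofList p)]) ++ pvPost ss := by
  by_cases h : PySem.Str.strip (String.ofList p) = "" <;> simp [pvPost, h]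

theorem pvPost_consFirst_nil (ss : List (List Char)) :
    pvPost (pvConsFirst [] ss) = pvPost ss := by
  cases ss with
  | nil => simp [pvConsFirst, pvPost]; decide
  | cons s t => simp [pvConsFirst]

theorem pvConsFirst_consFirst (cur : List Char) (c : Char) (ss : List (List Char)) :
    pvConsFirst cur (pvConsFirst [c] ss) = pvConsFirst (cur ++ [c]) ss := by
  cases ss <;> simp [pvConsFirst]

theorem segsB_nil : segsB [] = [[]] := by rw [segsB]; simp

theorem segsB_bar_nil : segsB ['|'] = [[], []] := by
  rw [segsB]; simp [List.dropWhile]; rw [segsB]; simp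

theorem segsB_bar_cons_skip (d : Char) (r : List Char) (hd : d = ':' ∨ d = '|' ∨ d = ']') :
    segsB ('|' :: d :: r) = [] :: segsB r := by
  rw [segsB]; simp [List.dropWhile]; rcases hd with h | h | h <;> simp [h]

theorem segsB_bar_cons_noskip (d : Char) (r : List Char) (hd : ¬(d = ':' ∨ d = '|' ∨ d = ']')) :
    segsB ('|' :: d :: r) = [] :: segsB (d :: r) := by
  rw [segsB]; simp [List.dropWhile]
  push_neg at hd
  simp [hd]

theorem segsB_colon_bar (r : List Char) : segsB (':' :: '|' :: r) = [] :: segsB r := by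
  rw [segsB]; simp [List.dropWhile, List.takeWhile]

theorem segsB_cons_content (c : Char) (t : List Char) (hc : c ≠ '|')
    (hct : ¬(c = ':' ∧ t.head? = some '|')) :
    segsB (c :: t) = pvConsFirst [c] (segsB t) := by
  have hp : (fun x => decide (x ≠ '|')) c = true := by simp [hc]
  conv_lhs => rw [segsB]
  conv_rhs => rw [segsB]
  rw [List.takeWhile_cons_of_pos (p := fun x => decide (x ≠ '|')) hp,
     List.dropWhile_cons_of_pos (p := fun x => decide (x ≠ '|')) hp]
  by_cases hde : (t.dropWhile (· ≠ '|')).isEmpty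
  · simp only [dif_pos hde]
    simp [pvConsFirst]
  · simp only [dif_neg hde]
    rcases htw : t.takeWhile (· ≠ '|') with _ | ⟨a, tw⟩
    · have ht : t.head? = some '|' := by
        rcases t with _ | ⟨x, xs⟩
        · simp at hde
        · simp [List.takeWhile_cons] at htw
          by_cases hx : x = '|'
          · simp [hx]
          · simp [hx] at htw
      have hcc : c ≠ ':' := fun h => hct ⟨h, ht⟩
      have e1 : ¬(([c] : List Char).getLast? = some ':') := by simp [hcc]
      have e2 : ¬(([] : List Char).getLast? = some ':') := by simp
      rw [if_neg e1, if_neg e2]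
      split_ifs <;> simp [pvConsFirst]
    · by_cases hcol : (a :: tw).getLast? = some ':'
      · have hyes : (c :: a :: tw).getLast? = some ':' := by simpa using hcol
        rw [if_pos hyes, if_pos hcol]
        simp [pvConsFirst]
      · have hno : ¬(c :: a :: tw).getLast? = some ':' := by simpa using hcol
        rw [if_neg hno, if_neg hcol]
        split_ifs <;> simp [pvConsFirst]

theorem pvLoop_eq (n : Nat) : ∀ (cs : List Char), cs.length ≤ n →
    ∀ (cur : List Char) (bars : List String),
    (cur.getLast? = some ':' → cs.head? ≠ some '|') →
    splitA_loop cs cur bars = bars ++ pvPost (pvConsFirst cur (segsB cs)) := by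
  induction n with
  | zero =>
    intro cs hlen cur bars _
    have : cs = [] := by cases cs <;> simp_all
    subst this
    rw [splitA_loop, segsB_nil]
    simp only [pvConsFirst, List.append_nil, pvPost_cons]
    split_ifs <;> simp [pvPost]
  | succ n ih =>
    intro cs hlen cur bars hside
    cases cs with
    | nil =>
      rw [splitA_loop, segsB_nil]
      simp only [pvConsFirst, List.append_nil, pvPost_cons]
      split_ifs <;> simp [pvPost]
    | cons c t =>
      rw [splitA_loop]
      by_cases hc : c = '|'
      · subst hc
        rw [if_pos rfl]
        dsimp only
        cases t with
        | nil =>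
          rw [segsB_bar_nil]
          rw [ih [] (by simp) [] _ (by simp)]
          rw [segsB_nil]
          simp only [pvConsFirst, List.nil_append, List.append_nil, pvPost_cons]
          split_ifs <;> simp [pvPost]
        | cons d r =>
          by_cases hd3 : d = ':' ∨ d = '|' ∨ d = ']'
          · have hdd : (decide (d = ':') || decide (d = '|') || decide (d = ']')) = true := by
              rcases hd3 with h | h | h <;> simp [h]
            rw [segsB_bar_cons_skip d r hd3]
            simp only [hd3, if_true]
            rw [ih r (by simp at hlen ⊢; omega) [] _ (by simp)]
            rw [pvPost_consFirst_nil]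
            simp only [pvConsFirst, List.nil_append, List.append_nil, pvPost_cons]
            split_ifs <;> simp
          · rw [segsB_bar_cons_noskip d r hd3]
            simp only [hd3, if_false]
            rw [ih (d :: r) (by simp at hlen ⊢; omega) [] _ (by simp)]
            rw [pvPost_consFirst_nil]
            simp only [pvConsFirst, List.nil_append, List.append_nil, pvPost_cons]
            split_ifs <;> simp
      · rw [if_neg hc]
        by_cases hcb : c = ':' ∧ t.head? = some '|'
        · rw [dif_pos hcb]
          obtain ⟨hc2, ht⟩ := hcb
          subst hc2
          cases t with
          | nil => simp at ht
          | cons x r =>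
            have hx : x = '|' := by simpa using ht
            subst hx
            simp only [List.tail_cons]
            rw [segsB_colon_bar]
            rw [ih r (by simp at hlen ⊢; omega) [] _ (by simp)]
            rw [pvPost_consFirst_nil]
            simp only [pvConsFirst, List.nil_append, List.append_nil, pvPost_cons]
            split_ifs <;> simp
        · rw [dif_neg hcb]
          have hside' : (cur ++ [c]).getLast? = some ':' → t.head? ≠ some '|' := by
            intro hlast
            have : c = ':' := by simpa using hlast
            intro ht
            exact hcb ⟨this, ht⟩
          rw [ih t (by simp at hlen ⊢; omega) (cur ++ [c]) bars hside']
          rw [segsB_cons_content c t hc hcb, pvConsFirst_consFirst]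

-- ===== VERDICT (by name: the statement is the Claim_ definition above) =====
theorem split_into_bars_spec : Claim_equal_split_into_bars := by
  intro s _
  unfold Spec_split_into_bars split_into_bars split_into_bars_alt
  rw [pvLoop_eq ((PySem.Str.strip s).toList.length) _ le_rfl [] [] (by simp)]
  rw [pvPost_consFirst_nil]
  rfl
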